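-- pv_equiv track=rewrite | github.com/sukhkar/python_program | string_format.py | string_format
-- ===== SOURCE A (Python) =====
-- def string_format(input_string: str) -> str:
--
--     '''
--     If the last character of the string is numeric,
--     then the input is invalid (not a valid string)
--     Example: "12adbchr1rtry5"
--     '''
--     if len(input_string) < 1 or input_string.isnumeric():
--         return f"{input_string} is not a valid input"
--
--     '''
--     If the 1st character of the string is not numeric, then
--     will consider the 1st character of the string as '1'.
--     Example - Input: "aaa2bcd"
--     Expected Output: "aaabcdbcd"
--
--     string_list: It used to prepare the string till the next numeric character found.
--     '''
--     if input_string[0].isalpha():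
--         string_list = [1]
--     else:
--         string_list = []
--
--     '''
--     Output_string: Contains the expected output of the input string
--     '''
--     output_string = ""
--
--     '''
--     Iterate of the input string and strore the numeric number with suffix string.
--     and finally updated the output string with each iteration.
--     '''
--     for i in input_string:
--         if i.isnumeric():
--             if string_list:
--                 if len(string_list) > 1:
--                     output_string += string_list[0] * string_list[1]
--                     string_list = []
--                     string_list.append(int(i))
--                 elif type(string_list[0]) == int:
--                     string_list[0] = (string_list[0] * 10) + int(i)
--             else:
--                 string_list.append(int(i))
--         elif i.isalpha():
--             if len(string_list) > 1:
--                 string_list[1] += i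
--             else:
--                 string_list.append(i)
--
--     if len(string_list) > 1:
--         output_string += string_list[0] * string_list[1]
--     return output_string
-- ===== SOURCE B (Python) =====
-- def string_format(input_string: str) -> str:
--     if len(input_string) < 1 or input_string.isnumeric():
--         return f"{input_string} is not a valid input"
--     # pass 1: tokenize into alternating ('num', value) / ('let', letters) runs;
--     # other characters are skipped and do not break a run
--     tokens = []
--     for ch in input_string:
--         if ch.isnumeric():
--             if tokens and tokens[-1][0] == 'num':
--                 tokens[-1] = ('num', tokens[-1][1] * 10 + int(ch))
--             else:
--                 tokens.append(('num', int(ch)))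
--         elif ch.isalpha():
--             if tokens and tokens[-1][0] == 'let':
--                 tokens[-1] = ('let', tokens[-1][1] + ch)
--             else:
--                 tokens.append(('let', ch))
--     # pass 2: each letters token is emitted repeated by the pending count
--     # (1 for a leading letters token); a trailing count emits nothing
--     out = []
--     pending = 1
--     for kind, val in tokens:
--         if kind == 'num':
--             pending = val
--         else:
--             out.append(pending * val)
--     return ''.join(out)
-- ===== Notes on version B (the rewrite author's own statement) =====
-- stated objective: alternative
-- what changed: A's single loop threading a heterogeneous accumulator list ([int], [int,str], with flushes interleaved) is replaced by a two-pass decomposition: one scan tokenizes the string into alternating count/letters run tokens, a second pass renders each letters token repeated by the pending count (implicit 1 for a leading letters run, trailing counts dropped).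
-- intended difference: On inputs whose first character is non-alphanumeric, whose first alphanumeric character is a letter, and which contain exactly one letter (witness '!a'), A returns the empty string because the letter is stranded in leftover loop state typed str, while B returns that letter formatted with the implicit count 1, which is the intended behaviour. — e.g. on string_format("!a"): A returns "", B returns "a"
import Mathlib
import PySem

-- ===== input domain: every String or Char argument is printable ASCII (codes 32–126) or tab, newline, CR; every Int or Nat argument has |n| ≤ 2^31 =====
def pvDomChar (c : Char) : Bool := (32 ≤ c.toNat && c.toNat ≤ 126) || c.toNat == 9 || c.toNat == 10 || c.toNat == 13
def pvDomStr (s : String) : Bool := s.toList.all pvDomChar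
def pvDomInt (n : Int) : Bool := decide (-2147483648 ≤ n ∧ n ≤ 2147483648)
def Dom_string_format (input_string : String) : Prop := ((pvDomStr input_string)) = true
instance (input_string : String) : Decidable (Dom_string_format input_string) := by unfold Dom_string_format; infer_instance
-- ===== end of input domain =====

-- B replaces A's single loop over an ad-hoc heterogeneous accumulator list by a two-pass
-- tokenize-then-render decomposition (objective: alternative); return value only.

-- int(ch) for a digit character (exact for '0'..'9', the only characters A/B apply it to)
def pvDigitVal (c : Char) : Int := (c.toNat : Int) - 48

-- ===== PORT A =====
-- A's string_list is a heterogeneous Python list; its reachable shapes are this inductive: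
inductive AState
  | empty                                   -- []
  | num (n : Int)                           -- [int]
  | numstr (n : Int) (s : List Char)        -- [int, str]
  | strOnly (s : List Char)                 -- [str]      (a letter appended to the empty list)
  | strStr (s : List Char) (t : List Char)  -- [str, str] (Python raises TypeError multiplying these)
deriving Repr, DecidableEq

-- one iteration of A's for-loop, branches in Python's order
def aStep (st : AState) (out : List Char) (c : Char) : AState × List Char :=
  if PySem.Chars.isdigit c then            -- i.isnumeric()  (== isdigit on the ASCII domain)
    match st with
    | .empty => (.num (pvDigitVal c), out)                                   -- else: append int(i)
    | .num n => (.num (n * 10 + pvDigitVal c), out)                          -- type int: accumulate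
    | .numstr n s => (.num (pvDigitVal c), out ++ PySem.List.pyRepeat s n)   -- len>1: flush, restart
    | .strOnly s => (.strOnly s, out)                                        -- len 1, type str: no branch fires
    | .strStr s t => (.strStr s t, out)    -- Python raises TypeError (str * str); outside Pre_, value immaterial
  else if PySem.Chars.isalpha c then
    match st with
    | .empty => (.strOnly [c], out)
    | .num n => (.numstr n [c], out)
    | .numstr n s => (.numstr n (s ++ [c]), out)
    | .strOnly s => (.strStr s [c], out)
    | .strStr s t => (.strStr s (t ++ [c]), out)
  else (st, out)

def aLoop : List Char → AState → List Char → List Char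
  | [], st, out =>
    match st with
    | .numstr n s => out ++ PySem.List.pyRepeat s n    -- final: if len > 1: flush
    | .strStr _ _ => out    -- Python raises TypeError here; outside Pre_, value immaterial
    | _ => out
  | c :: cs, st, out => aLoop cs (aStep st out c).1 (aStep st out c).2

def string_format (input_string : String) : String :=
  if PySem.Chars.len input_string.toList < 1 ∨ PySem.Chars.strIsdigit input_string.toList = true then
    -- isnumeric() == isdigit() on the printable-ASCII domain
    input_string ++ " is not a valid input"
  else
    let init := match input_string.toList with          -- input_string[0].isalpha() (len ≥ 1 here)
      | c :: _ => if PySem.Chars.isalpha c then AState.num 1 else AState.empty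
      | [] => AState.empty
    String.ofList (aLoop input_string.toList init [])

-- ===== PORT B =====
inductive Tok
  | num (n : Int)
  | lett (s : List Char)
deriving Repr, DecidableEq

-- one iteration of B's tokenizer loop: inspect/replace tokens[-1] or append
def tokStep (tokens : List Tok) (c : Char) : List Tok :=
  if PySem.Chars.isdigit c then            -- ch.isnumeric()  (== isdigit on the ASCII domain)
    match tokens.getLast? with
    | some (.num n) => tokens.dropLast ++ [Tok.num (n * 10 + pvDigitVal c)]
    | _ => tokens ++ [Tok.num (pvDigitVal c)]
  else if PySem.Chars.isalpha c then
    match tokens.getLast? with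
    | some (.lett s) => tokens.dropLast ++ [Tok.lett (s ++ [c])]
    | _ => tokens ++ [Tok.lett [c]]
  else tokens

def tokFold : List Char → List Tok → List Tok
  | [], ts => ts
  | c :: cs, ts => tokFold cs (tokStep ts c)

-- second pass: pending count, emitted pieces concatenated (''.join of the appended pieces)
def render : List Tok → Int → List Char → List Char
  | [], _, out => out
  | .num n :: ts, _, out => render ts n out
  | .lett s :: ts, p, out => render ts p (out ++ PySem.List.pyRepeat s p)

def string_format_alt (input_string : String) : String :=
  if PySem.Chars.len input_string.toList < 1 ∨ PySem.Chars.strIsdigit input_string.toList = true then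
    input_string ++ " is not a valid input"
  else
    String.ofList (render (tokFold input_string.toList []) 1 [])

-- ===== PRECONDITION & SPEC =====
-- true iff the first alphanumeric character of the list is a letter
def firstAlnumAlpha : List Char → Bool
  | [] => false
  | c :: cs =>
    if PySem.Chars.isdigit c then false
    else if PySem.Chars.isalpha c then true
    else firstAlnumAlpha cs

-- first char not alphanumeric and the first alphanumeric char a letter: A's accumulator
-- then holds a string where an int is expected
def poisonedChars : List Char → Bool
  | [] => false
  | c :: cs => !(PySem.Chars.isalpha c) && !(PySem.Chars.isdigit c) && firstAlnumAlpha cs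

def alphaCount (l : List Char) : Nat := l.countP (fun c => PySem.Chars.isalpha c)

-- Pre_ excludes exactly the inputs on which A raises TypeError ('str' * 'str'): first char not
-- alphanumeric, first alphanumeric char a letter, and at least two letters in total.
def Pre_string_format (input_string : String) : Prop :=
  ¬ (poisonedChars input_string.toList = true ∧ 2 ≤ alphaCount input_string.toList)

instance (input_string : String) : Decidable (Pre_string_format input_string) := by
  unfold Pre_string_format; infer_instance

def pvWitness_string_format : String := "aaa2bcd"

-- On inputs whose first char is non-alphanumeric, whose first alphanumeric char is a letter and
-- which contain exactly one letter, A returns "" (the letter is stranded in leftover loop state)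
-- while B returns that letter with the implicit count 1, which is the intended formatting.
def D_string_format (input_string : String) : Prop :=
  poisonedChars input_string.toList = true ∧ alphaCount input_string.toList = 1

instance (input_string : String) : Decidable (D_string_format input_string) := by
  unfold D_string_format; infer_instance

def Spec_string_format (input_string : String) (out : String) : Prop :=
  ¬ D_string_format input_string → out = string_format_alt input_string

instance (input_string : String) (out : String) : Decidable (Spec_string_format input_string out) := by
  unfold Spec_string_format; infer_instance

def pvDiffWitness_string_format : String := "!a"
def pvDiffWitnessOut_string_format : String × String := ("", "a")

-- ===== CLAIM (what is proved, stated in full; the proofs are below) =====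
def Claim_unchanged_string_format : Prop := ∀ (input_string : String), Dom_string_format input_string → Pre_string_format input_string → Spec_string_format input_string (string_format input_string)
def Claim_changed_string_format : Prop := Dom_string_format (pvDiffWitness_string_format) ∧ Pre_string_format (pvDiffWitness_string_format) ∧ D_string_format (pvDiffWitness_string_format) ∧ string_format (pvDiffWitness_string_format) = pvDiffWitnessOut_string_format.1 ∧ string_format_alt (pvDiffWitness_string_format) = pvDiffWitnessOut_string_format.2 ∧ pvDiffWitnessOut_string_format.1 ≠ pvDiffWitnessOut_string_format.2
def Claim_exact_string_format : Prop := ∀ (input_string : String), Dom_string_format input_string → Pre_string_format input_string → D_string_format input_string → string_format input_string ≠ string_format_alt input_string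

-- ===== LEMMAS AND PROOFS =====

lemma isalpha_not_isdigit {c : Char} (h : PySem.Chars.isalpha c = true) :
    PySem.Chars.isdigit c = false := by
  simp [PySem.Chars.isalpha, PySem.Chars.isupper, PySem.Chars.islower,
        PySem.Chars.isdigit, Char.le_def, UInt32.le_iff_toNat_le] at h ⊢
  rcases h with h | h <;> omega

-- the tokenizer only ever inspects or replaces the last token
lemma tokStep_append (ts l : List Tok) (c : Char) (hl : l ≠ []) :
    tokStep (ts ++ l) c = ts ++ tokStep l c := by
  unfold tokStep
  rw [List.getLast?_append_of_ne_nil ts hl]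
  split_ifs <;>
    (cases h : l.getLast? with
     | none => simp
     | some t => cases t <;> simp [List.dropLast_append_of_ne_nil hl])

lemma tokStep_ne_nil (l : List Tok) (c : Char) (hl : l ≠ []) : tokStep l c ≠ [] := by
  unfold tokStep
  split_ifs <;>
    (cases h : l.getLast? with
     | none => simp [hl]
     | some t => cases t <;> simp [hl])

lemma tokFold_append (cs : List Char) (ts l : List Tok) (hl : l ≠ []) :
    tokFold cs (ts ++ l) = ts ++ tokFold cs l := by
  induction cs generalizing l with
  | nil => rfl
  | cons c cs ih =>
    simp only [tokFold]
    rw [tokStep_append ts l c hl, ih _ (tokStep_ne_nil l c hl)]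

-- the simulation invariant: A's loop state vs B's last token
lemma sim (cs : List Char) :
    (∀ out, firstAlnumAlpha cs = false →
        aLoop cs .empty out = render (tokFold cs []) 1 out) ∧
    (∀ n p out, aLoop cs (.num n) out = render (tokFold cs [.num n]) p out) ∧
    (∀ n s out, aLoop cs (.numstr n s) out = render (tokFold cs [.lett s]) n out) := by
  induction cs with
  | nil =>
    refine ⟨?_, ?_, ?_⟩ <;> intros <;> simp [aLoop, tokFold, render]
  | cons c cs ih =>
    obtain ⟨ih1, ih2, ih3⟩ := ih
    cases hd : PySem.Chars.isdigit c with
    | true =>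
      refine ⟨?_, ?_, ?_⟩
      · intro out hfa
        simp only [aLoop, aStep, tokFold, tokStep, hd, if_true, List.getLast?_nil,
          List.nil_append]
        exact ih2 (pvDigitVal c) 1 out
      · intro n p out
        simp only [aLoop, aStep, tokFold, tokStep, hd, if_true, List.getLast?_singleton,
          List.dropLast_singleton, List.nil_append]
        exact ih2 (n * 10 + pvDigitVal c) p out
      · intro n s out
        simp only [aLoop, aStep, tokFold, tokStep, hd, if_true, List.getLast?_singleton]
        rw [tokFold_append cs [Tok.lett s] [Tok.num (pvDigitVal c)] (by simp)]
        simp only [List.singleton_append, render]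
        exact ih2 (pvDigitVal c) n (out ++ PySem.List.pyRepeat s n)
    | false =>
      cases ha : PySem.Chars.isalpha c with
      | true =>
        refine ⟨?_, ?_, ?_⟩
        · intro out hfa
          exfalso
          simp [firstAlnumAlpha, hd, ha] at hfa
        · intro n p out
          simp only [aLoop, aStep, tokFold, tokStep, hd, ha, if_true, if_false,
            Bool.false_eq_true, List.getLast?_singleton]
          rw [tokFold_append cs [Tok.num n] [Tok.lett [c]] (by simp)]
          simp only [List.singleton_append, render]
          exact ih3 n [c] out
        · intro n s out
          simp only [aLoop, aStep, tokFold, tokStep, hd, ha, if_true, if_false,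
            Bool.false_eq_true, List.getLast?_singleton, List.dropLast_singleton,
            List.nil_append]
          exact ih3 n (s ++ [c]) out
      | false =>
        refine ⟨?_, ?_, ?_⟩
        · intro out hfa
          simp only [aLoop, aStep, tokFold, tokStep, hd, ha, Bool.false_eq_true, if_false]
          apply ih1
          simpa [firstAlnumAlpha, hd, ha] using hfa
        · intro n p out
          simp only [aLoop, aStep, tokFold, tokStep, hd, ha, Bool.false_eq_true, if_false]
          exact ih2 n p out
        · intro n s out
          simp only [aLoop, aStep, tokFold, tokStep, hd, ha, Bool.false_eq_true, if_false]
          exact ih3 n s out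

lemma firstAlnumAlpha_alphaCount {cs : List Char} (h : firstAlnumAlpha cs = true) :
    1 ≤ alphaCount cs := by
  induction cs with
  | nil => simp [firstAlnumAlpha] at h
  | cons c cs ih =>
    cases hd : PySem.Chars.isdigit c with
    | true => simp [firstAlnumAlpha, hd] at h
    | false =>
      cases ha : PySem.Chars.isalpha c with
      | true => simp [alphaCount, ha]
      | false =>
        rw [firstAlnumAlpha, hd, ha] at h
        simp only [if_false, Bool.false_eq_true] at h
        have := ih h
        simp only [alphaCount, List.countP_cons, ha] at this ⊢
        omega

-- A drops digits silently once the accumulator holds a lone string; with no further letters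
-- its loop ends in a length-1 list and emits nothing
lemma aLoop_strOnly (cs : List Char) (s out : List Char) (h : alphaCount cs = 0) :
    aLoop cs (.strOnly s) out = out := by
  induction cs generalizing out with
  | nil => rfl
  | cons c cs ih =>
    simp only [alphaCount, List.countP_cons] at h
    cases ha : PySem.Chars.isalpha c with
    | true => simp [ha] at h
    | false =>
      cases hd : PySem.Chars.isdigit c with
      | true =>
        simp only [aLoop, aStep, hd, if_true]
        apply ih
        simp only [alphaCount]
        omega
      | false =>
        simp only [aLoop, aStep, hd, ha, Bool.false_eq_true, if_false]
        apply ih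
        simp only [alphaCount]
        omega

lemma aLoop_empty_one_alpha (cs : List Char) (out : List Char)
    (hfa : firstAlnumAlpha cs = true) (h1 : alphaCount cs = 1) :
    aLoop cs .empty out = out := by
  induction cs generalizing out with
  | nil => simp [firstAlnumAlpha] at hfa
  | cons c cs ih =>
    cases hd : PySem.Chars.isdigit c with
    | true => simp [firstAlnumAlpha, hd] at hfa
    | false =>
      simp only [alphaCount, List.countP_cons] at h1
      cases ha : PySem.Chars.isalpha c with
      | true =>
        simp only [aLoop, aStep, hd, ha, Bool.false_eq_true, if_false, if_true]
        simp only [ha, if_true] at h1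
        exact aLoop_strOnly cs [c] out (by unfold alphaCount; omega)
      | false =>
        rw [firstAlnumAlpha, hd, ha] at hfa
        simp only [if_false, Bool.false_eq_true] at hfa
        simp only [ha, Bool.false_eq_true, if_false] at h1
        simp only [aLoop, aStep, hd, ha, Bool.false_eq_true, if_false]
        apply ih <;> first | exact hfa | (simp only [alphaCount]; omega)

-- B's tokenizer on letter-free input keeps a single num token
lemma tokFold_num_no_alpha (cs : List Char) (h : alphaCount cs = 0) (n : Int) :
    ∃ m, tokFold cs [Tok.num n] = [Tok.num m] := by
  induction cs generalizing n with
  | nil => exact ⟨n, rfl⟩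
  | cons c cs ih =>
    simp only [alphaCount, List.countP_cons] at h
    cases ha : PySem.Chars.isalpha c with
    | true => simp [ha] at h
    | false =>
      cases hd : PySem.Chars.isdigit c with
      | true =>
        simp only [tokFold, tokStep, hd, if_true, List.getLast?_singleton,
          List.dropLast_singleton, List.nil_append]
        exact ih (by unfold alphaCount; omega) _
      | false =>
        simp only [tokFold, tokStep, hd, ha, Bool.false_eq_true, if_false]
        exact ih (by unfold alphaCount; omega) n

lemma render_lett_no_alpha (cs : List Char) (s : List Char) (p : Int) (out : List Char)
    (h : alphaCount cs = 0) :
    render (tokFold cs [Tok.lett s]) p out = out ++ PySem.List.pyRepeat s p := by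
  induction cs with
  | nil => simp [tokFold, render]
  | cons c cs ih =>
    simp only [alphaCount, List.countP_cons] at h
    cases ha : PySem.Chars.isalpha c with
    | true => simp [ha] at h
    | false =>
      cases hd : PySem.Chars.isdigit c with
      | true =>
        simp only [tokFold, tokStep, hd, if_true, List.getLast?_singleton]
        rw [tokFold_append cs [Tok.lett s] [Tok.num (pvDigitVal c)] (by simp)]
        obtain ⟨m, hm⟩ := tokFold_num_no_alpha cs (by unfold alphaCount; omega) (pvDigitVal c)
        rw [hm]
        simp [render]
      | false =>
        simp only [tokFold, tokStep, hd, ha, Bool.false_eq_true, if_false]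
        exact ih (by unfold alphaCount; omega)

lemma render_one_alpha (cs : List Char)
    (hfa : firstAlnumAlpha cs = true) (h1 : alphaCount cs = 1) :
    ∃ a, render (tokFold cs []) 1 [] = [a] := by
  induction cs with
  | nil => simp [firstAlnumAlpha] at hfa
  | cons c cs ih =>
    cases hd : PySem.Chars.isdigit c with
    | true => simp [firstAlnumAlpha, hd] at hfa
    | false =>
      simp only [alphaCount, List.countP_cons] at h1
      cases ha : PySem.Chars.isalpha c with
      | true =>
        simp only [tokFold, tokStep, hd, ha, Bool.false_eq_true, if_false, if_true,
          List.getLast?_nil, List.nil_append]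
        simp only [ha, if_true] at h1
        refine ⟨c, ?_⟩
        rw [render_lett_no_alpha cs [c] 1 [] (by unfold alphaCount; omega)]
        simp [PySem.List.pyRepeat_singleton]
      | false =>
        rw [firstAlnumAlpha, hd, ha] at hfa
        simp only [if_false, Bool.false_eq_true] at hfa
        simp only [ha, Bool.false_eq_true, if_false] at h1
        simp only [tokFold, tokStep, hd, ha, Bool.false_eq_true, if_false]
        exact ih hfa (by unfold alphaCount; omega)

-- ===== VERDICT (by name: the statement is the Claim_ definition above) =====
theorem string_format_spec : Claim_unchanged_string_format := by
  intro s _ hpre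
  intro hnd
  by_cases hg : PySem.Chars.len s.toList < 1 ∨ PySem.Chars.strIsdigit s.toList = true
  · simp only [string_format, string_format_alt, if_pos hg]
  · simp only [string_format, string_format_alt, if_neg hg]
    congr 1
    cases hl : s.toList with
    | nil =>
      exfalso
      exact hg (Or.inl (by simp [hl, PySem.Chars.len]))
    | cons c cs =>
      cases ha : PySem.Chars.isalpha c with
      | true =>
        have hd : PySem.Chars.isdigit c = false := isalpha_not_isdigit ha
        simp only [ha, if_true]
        show aLoop (c :: cs) (.num 1) [] = render (tokFold (c :: cs) []) 1 []
        simp only [aLoop, aStep, tokFold, tokStep, hd, ha, Bool.false_eq_true, if_false,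
          if_true, List.getLast?_nil, List.nil_append]
        exact (sim cs).2.2 1 [c] []
      | false =>
        simp only [ha, Bool.false_eq_true, if_false]
        have hfa : firstAlnumAlpha (c :: cs) = false := by
          cases hd : PySem.Chars.isdigit c with
          | true => simp [firstAlnumAlpha, hd]
          | false =>
            rw [firstAlnumAlpha, hd, ha]
            simp only [if_false, Bool.false_eq_true]
            cases hfc : firstAlnumAlpha cs with
            | false => rfl
            | true =>
              exfalso
              have hpois : poisonedChars (c :: cs) = true := by
                simp [poisonedChars, ha, hd, hfc]
              have hcount : 1 ≤ alphaCount (c :: cs) := by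
                have := firstAlnumAlpha_alphaCount hfc
                simp only [alphaCount, List.countP_cons, ha] at this ⊢
                omega
              rw [← hl] at hpois
              rcases Nat.lt_or_ge (alphaCount (c :: cs)) 2 with hlt | hge
              · exact hnd ⟨hpois, by rw [hl]; omega⟩
              · exact hpre ⟨hpois, by rw [hl]; omega⟩
        exact (sim (c :: cs)).1 [] hfa

theorem string_format_changed : Claim_changed_string_format := by
  unfold Claim_changed_string_format; decide

theorem string_format_tight : Claim_exact_string_format := by
  intro s _ _ hd heq
  obtain ⟨hpois, h1⟩ := hd
  cases hl : s.toList with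
  | nil => rw [hl] at hpois; simp [poisonedChars] at hpois
  | cons c cs =>
    rw [hl] at hpois h1
    rw [poisonedChars] at hpois
    have ha : PySem.Chars.isalpha c = false := by
      cases h : PySem.Chars.isalpha c with
      | false => rfl
      | true => rw [h] at hpois; simp at hpois
    have hdc : PySem.Chars.isdigit c = false := by
      cases h : PySem.Chars.isdigit c with
      | false => rfl
      | true => rw [h] at hpois; simp at hpois
    rw [ha, hdc] at hpois
    simp only [Bool.not_false, Bool.true_and] at hpois
    have hcs1 : alphaCount cs = 1 := by
      simp [alphaCount, ha] at h1
      simpa [alphaCount] using h1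
    have hg : ¬ (PySem.Chars.len s.toList < 1 ∨ PySem.Chars.strIsdigit s.toList = true) := by
      rw [hl]
      rintro (hlt | hdig)
      · simp [PySem.Chars.len] at hlt
        omega
      · simp [PySem.Chars.strIsdigit, hdc] at hdig
    rw [string_format, string_format_alt, if_neg hg, if_neg hg, hl] at heq
    simp only [ha, Bool.false_eq_true, if_false] at heq
    have hA : aLoop (c :: cs) .empty [] = [] := by
      simp only [aLoop, aStep, hdc, ha, Bool.false_eq_true, if_false]
      exact aLoop_empty_one_alpha cs [] hpois hcs1
    obtain ⟨a, hB⟩ := render_one_alpha cs hpois hcs1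
    have hBfull : render (tokFold (c :: cs) []) 1 [] = [a] := by
      simp only [tokFold, tokStep, hdc, ha, Bool.false_eq_true, if_false]
      exact hB
    rw [hA, hBfull] at heq
    have := congrArg String.toList heq
    simp at this
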